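-- pv_equiv track=rewrite | github.com/koguz/Tartarus | find_patterns.py | find_repeating_patterns_in_sequence
-- ===== SOURCE A (Python) =====
-- def find_repeating_patterns_in_sequence(sequence, min_length=3, max_length=10):
--     """
--     Find patterns that repeat within a single sequence.
--     Returns patterns that appear at least twice consecutively or multiple times.
--     """
--     patterns = []
--
--     for length in range(min_length, max_length + 1):
--         for start in range(len(sequence) - length * 2 + 1):
--             pattern = tuple(sequence[start:start + length])
--             # Check if pattern repeats immediately after
--             next_segment = tuple(sequence[start + length:start + length * 2])
--             if pattern == next_segment:
--                 # Found a repeating pattern, count total occurrences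
--                 count = 0
--                 pos = start
--                 while pos + length <= len(sequence):
--                     if tuple(sequence[pos:pos + length]) == pattern:
--                         count += 1
--                         pos += length
--                     else:
--                         break
--                 if count >= 2:
--                     patterns.append((pattern, count, start))
--
--     return patterns
-- ===== SOURCE B (Python) =====
-- def find_repeating_patterns_in_sequence(sequence, min_length=3, max_length=10):
--     """
--     Find immediately-repeating contiguous patterns and their counts.
--     One pass per length: precompute eq[j] = (sequence[j] == sequence[j+L])
--     and runs[j] = length of the run of True in eq starting at j; a block of
--     length L repeats immediately at start iff runs[start] >= L, and the number
--     of consecutive copies is 1 + runs[start] // L.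
--     """
--     n = len(sequence)
--     patterns = []
--     for L in range(min_length, min(max_length, n // 2) + 1):
--         eq = [x == y for x, y in zip(sequence, sequence[L:])]
--         runs = [0]
--         for e in reversed(eq):
--             runs.append(runs[-1] + 1 if e else 0)
--         runs.reverse()
--         for start in range(n - 2 * L + 1):
--             if runs[start] >= L:
--                 patterns.append((tuple(sequence[start:start + L]),
--                                  1 + runs[start] // L, start))
--     return patterns
-- ===== Notes on version B (the rewrite author's own statement) =====
-- stated objective: alternative
-- what changed: Instead of comparing length-L slices and re-scanning blocks per start, B precomputes per length an equality array eq[j]=(seq[j]==seq[j+L]) and its suffix run-lengths runs, so the repeat test becomes runs[start]>=L and the occurrence count 1+runs[start]//L, and it skips lengths that cannot fit twice (L > n//2).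
-- outside the precondition, e.g. on find_repeating_patterns_in_sequence([0, 1], -1, -1): A returns [((), 2, 2), ((), 3, 3)], B raises IndexError
import Mathlib
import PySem

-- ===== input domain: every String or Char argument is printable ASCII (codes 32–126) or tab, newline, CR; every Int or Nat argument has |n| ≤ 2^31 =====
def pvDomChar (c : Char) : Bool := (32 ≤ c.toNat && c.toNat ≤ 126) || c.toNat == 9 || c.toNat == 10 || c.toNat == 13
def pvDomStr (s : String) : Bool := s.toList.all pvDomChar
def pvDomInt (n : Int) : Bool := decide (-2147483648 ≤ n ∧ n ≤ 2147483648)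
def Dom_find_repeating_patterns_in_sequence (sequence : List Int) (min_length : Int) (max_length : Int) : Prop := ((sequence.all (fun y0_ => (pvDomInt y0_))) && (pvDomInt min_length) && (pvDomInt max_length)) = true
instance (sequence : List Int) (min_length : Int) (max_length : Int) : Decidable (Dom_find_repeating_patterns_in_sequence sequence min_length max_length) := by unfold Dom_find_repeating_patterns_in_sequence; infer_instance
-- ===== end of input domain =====

-- B replaces A's per-start slice comparisons and per-start rescanning while-loop by a
-- single pass per length over a precomputed equality/run-length array (objective: alternative).

-- ===== PORT A =====
-- the inner 'while pos + length <= len(sequence)' loop of A; fuel (sequence.length + 1)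
-- strictly bounds the number of iterations whenever 1 ≤ length (the lengths Pre_ admits)
def pvCountLoopA (sequence pattern : List Int) (length : Int) : Nat → Int → Int → Int
  | 0, _, count => count
  | fuel + 1, pos, count =>
    if pos + length ≤ (sequence.length : Int) then
      if PySem.List.slice sequence (some pos) (some (pos + length)) = pattern then
        pvCountLoopA sequence pattern length fuel (pos + length) (count + 1)
      else count
    else count

def find_repeating_patterns_in_sequence (sequence : List Int) (min_length : Int) (max_length : Int) : List (List Int × Int × Int) :=
  (PySem.List.pyRange min_length (max_length + 1) 1).foldl (fun patterns length =>
    (PySem.List.pyRange 0 ((sequence.length : Int) - length * 2 + 1) 1).foldl (fun patterns start =>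
      let pattern := PySem.List.slice sequence (some start) (some (start + length))
      let next_segment := PySem.List.slice sequence (some (start + length)) (some (start + length * 2))
      if pattern = next_segment then
        let count := pvCountLoopA sequence pattern length (sequence.length + 1) start 0
        if 2 ≤ count then patterns ++ [(pattern, count, start)] else patterns
      else patterns) patterns) []

-- ===== PORT B =====
def find_repeating_patterns_in_sequence_alt (sequence : List Int) (min_length : Int) (max_length : Int) : List (List Int × Int × Int) :=
  -- for L in range(min_length, min(max_length, n // 2) + 1)
  (PySem.List.pyRange min_length (min max_length (PySem.Int.floordiv (sequence.length : Int) 2) + 1) 1).foldl (fun patterns L =>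
    -- eq = [x == y for x, y in zip(sequence, sequence[L:])]
    let eq : List Bool := (sequence.zip (PySem.List.slice sequence (some L) none)).map (fun p => p.1 == p.2)
    -- runs = [0]; for e in reversed(eq): runs.append(runs[-1] + 1 if e else 0); runs.reverse()
    -- (runs is never empty, so runs[-1] is its last element: getLastD)
    let runs : List Int := ((eq.reverse).foldl (fun r e => r ++ [if e then r.getLastD 0 + 1 else 0]) [0]).reverse
    (PySem.List.pyRange 0 ((sequence.length : Int) - 2 * L + 1) 1).foldl (fun patterns start =>
      let rs := PySem.List.pyGetD runs start 0
      if L ≤ rs then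
        patterns ++ [(PySem.List.slice sequence (some start) (some (start + L)), 1 + PySem.Int.floordiv rs L, start)]
      else patterns) patterns) []

-- ===== PRECONDITION & SPEC =====
-- Pre_ excludes the inputs whose length range contains a length ≤ 0: there A either
-- diverges (its while-loop advances pos by a nonpositive step over blocks that compare
-- equal forever) or returns accidental empty-pattern entries produced by Python's
-- negative-slice wraparound, inputs on which B itself raises IndexError.
def Pre_find_repeating_patterns_in_sequence (sequence : List Int) (min_length : Int) (max_length : Int) : Prop := min_length ≤ max_length → 1 ≤ min_length
instance (sequence : List Int) (min_length : Int) (max_length : Int) : Decidable (Pre_find_repeating_patterns_in_sequence sequence min_length max_length) := by unfold Pre_find_repeating_patterns_in_sequence; infer_instance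

def pvWitness_find_repeating_patterns_in_sequence : List Int × Int × Int := ([1, 2, 1, 2, 1, 2, 7], 2, 3)

def Spec_find_repeating_patterns_in_sequence (sequence : List Int) (min_length : Int) (max_length : Int) (out : List (List Int × Int × Int)) : Prop := out = find_repeating_patterns_in_sequence_alt sequence min_length max_length
instance (sequence : List Int) (min_length : Int) (max_length : Int) (out : List (List Int × Int × Int)) : Decidable (Spec_find_repeating_patterns_in_sequence sequence min_length max_length out) := by unfold Spec_find_repeating_patterns_in_sequence; infer_instance

-- ===== CLAIM (what is proved, stated in full; the proofs are below) =====
def Claim_equal_find_repeating_patterns_in_sequence : Prop := ∀ (sequence : List Int) (min_length : Int) (max_length : Int), Dom_find_repeating_patterns_in_sequence sequence min_length max_length → Pre_find_repeating_patterns_in_sequence sequence min_length max_length → Spec_find_repeating_patterns_in_sequence sequence min_length max_length (find_repeating_patterns_in_sequence sequence min_length max_length)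

-- ===== LEMMAS AND PROOFS =====

-- run length of `true`s at the head of a boolean list
def pvRun : List Bool → Nat
  | [] => 0
  | e :: t => if e then pvRun t + 1 else 0

theorem pvRun_le (bs : List Bool) : pvRun bs ≤ bs.length := by
  induction bs with
  | nil => simp [pvRun]
  | cons e t ih => by_cases he : e <;> simp [pvRun, he] <;> omega

theorem getD_drop {α : Type} (bs : List α) (s m : Nat) (d : α) :
    (bs.drop s).getD m d = bs.getD (s + m) d := by
  simp [List.getD_eq_getElem?_getD, List.getElem?_drop]

theorem pvRun_getD_true (bs : List Bool) {j : Nat} (hj : j < pvRun bs) :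
    bs.getD j false = true := by
  induction bs generalizing j with
  | nil => simp [pvRun] at hj
  | cons e t ih =>
    by_cases he : e <;> simp [pvRun, he] at hj
    cases j with
    | zero => simp [he]
    | succ m => simpa using ih (by omega)

theorem pvRun_getD_self (bs : List Bool) : bs.getD (pvRun bs) false = false := by
  induction bs with
  | nil => simp
  | cons e t ih =>
    by_cases he : e
    · simp only [pvRun, he, if_true, List.getD_cons_succ]; exact ih
    · simp [pvRun, he]

theorem pvRun_ge (bs : List Bool) (k : Nat) (h : ∀ j < k, bs.getD j false = true) :
    k ≤ pvRun bs := by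
  by_contra hc
  have := h (pvRun bs) (by omega)
  rw [pvRun_getD_self] at this
  exact Bool.false_ne_true this

-- the `runs` list, built front-to-back (foldr form of B's reversed append loop)
def pvRunsList : List Bool → List Int
  | [] => [0]
  | e :: t => (if e then (pvRunsList t).headD 0 + 1 else 0) :: pvRunsList t

theorem headD_pvRunsList (bs : List Bool) : (pvRunsList bs).headD 0 = (pvRun bs : Int) := by
  induction bs with
  | nil => simp [pvRunsList, pvRun]
  | cons e t ih =>
    by_cases he : e
    · simp only [pvRunsList, pvRun, he, if_true, List.headD_cons]
      rw [ih]; push_cast; ring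
    · simp [pvRunsList, pvRun, he]

theorem build_eq_runsList (bs : List Bool) :
    (bs.reverse).foldl (fun r e => r ++ [if e then r.getLastD 0 + 1 else 0]) [0]
      = (pvRunsList bs).reverse := by
  induction bs with
  | nil => rfl
  | cons e t ih =>
    have hlast : ((pvRunsList t).reverse).getLastD 0 = (pvRunsList t).headD 0 := by
      cases h : pvRunsList t with
      | nil => simp [h]
      | cons a u => simp
    rw [List.reverse_cons, List.foldl_append, ih]
    simp only [List.foldl_cons, List.foldl_nil]
    show _ = ((if e then (pvRunsList t).headD 0 + 1 else 0) :: pvRunsList t).reverse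
    rw [List.reverse_cons, hlast]

theorem getD_pvRunsList (bs : List Bool) (s : Nat) :
    (pvRunsList bs).getD s 0 = (pvRun (bs.drop s) : Int) := by
  induction bs generalizing s with
  | nil => cases s <;> simp [pvRunsList, pvRun]
  | cons e t ih =>
    cases s with
    | zero =>
      have h := headD_pvRunsList (e :: t)
      cases hh : pvRunsList (e :: t) with
      | nil => simp [pvRunsList] at hh
      | cons a u => rw [hh] at h; simpa using h
    | succ m =>
      simp only [pvRunsList, List.getD_cons_succ, List.drop_succ_cons]
      exact ih m

-- the equality array eq[j] = (seq[j] == seq[j+l])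
def pvEqArr (seq : List Int) (l : Nat) : List Bool :=
  List.zipWith (fun a b => a == b) seq (seq.drop l)

theorem length_pvEqArr (seq : List Int) (l : Nat) :
    (pvEqArr seq l).length = seq.length - l := by
  simp [pvEqArr]

theorem pvEqArr_getD (seq : List Int) (l j : Nat) (hj : j + l < seq.length) :
    (pvEqArr seq l).getD j false = (seq.getD j 0 == seq.getD (j + l) 0) := by
  have h1 : j < seq.length := by omega
  have h2 : j < (seq.drop l).length := by simp; omega
  rw [pvEqArr, List.getD_eq_getElem?_getD, List.getElem?_zipWith,
    List.getElem?_eq_getElem h1, List.getElem?_eq_getElem h2]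
  simp only [Option.getD_some]
  rw [List.getElem_drop]
  simp [List.getD_eq_getElem?_getD, List.getElem?_eq_getElem h1,
    List.getElem?_eq_getElem hj, Nat.add_comm l j]

-- blocks
theorem pvBlk_getD (seq : List Int) (a l j : Nat) (hj : j < l) (h : a + l ≤ seq.length) :
    ((seq.drop a).take l).getD j 0 = seq.getD (a + j) 0 := by
  simp [List.getD_eq_getElem?_getD, List.getElem?_take, hj, List.getElem?_drop]

theorem length_pvBlk (seq : List Int) (a l : Nat) (_h : a + l ≤ seq.length) :
    ((seq.drop a).take l).length = l := by
  simp; omega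

theorem blk_eq_iff (seq : List Int) (l a : Nat) (h : a + 2 * l ≤ seq.length) :
    ((seq.drop a).take l = (seq.drop (a + l)).take l)
      ↔ ∀ j < l, (pvEqArr seq l).getD (a + j) false = true := by
  constructor
  · intro he j hj
    have : ((seq.drop a).take l).getD j 0 = ((seq.drop (a + l)).take l).getD j 0 := by rw [he]
    rw [pvBlk_getD seq a l j hj (by omega), pvBlk_getD seq (a + l) l j hj (by omega)] at this
    rw [pvEqArr_getD seq l (a + j) (by omega)]
    simp only [beq_iff_eq]
    have hr : a + l + j = a + j + l := by ring
    rw [this, hr]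
  · intro he
    apply List.ext_getElem
    · rw [length_pvBlk seq a l (by omega), length_pvBlk seq (a + l) l (by omega)]
    · intro j hj1 hj2
      rw [length_pvBlk seq a l (by omega)] at hj1
      have h1 := he j hj1
      rw [pvEqArr_getD seq l (a + j) (by omega)] at h1
      simp only [beq_iff_eq] at h1
      have e1 : ((seq.drop a).take l).getD j 0 = ((seq.drop (a + l)).take l).getD j 0 := by
        rw [pvBlk_getD seq a l j hj1 (by omega), pvBlk_getD seq (a + l) l j hj1 (by omega)]
        have hr : a + j + l = a + l + j := by ring
        rw [hr] at h1; exact h1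
      simpa [List.getD_eq_getElem?_getD, List.getElem?_eq_getElem, hj1, hj2,
        List.getElem?_eq_getElem (show a + l + j < seq.length by omega),
        length_pvBlk seq a l (show a + l ≤ seq.length by omega)] using e1

theorem chain_fwd (seq : List Int) (l s k : Nat)
    (hk : s + (k + 1) * l ≤ seq.length)
    (hF : k * l ≤ pvRun ((pvEqArr seq l).drop s)) :
    ∀ i ≤ k, (seq.drop (s + i * l)).take l = (seq.drop s).take l := by
  intro i hi
  induction i with
  | zero => simp
  | succ m ih =>
    have hprev := ih (by omega)
    have hexp1 : (m + 2) * l = m * l + 2 * l := by ring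
    have hexp2 : (m + 1) * l = m * l + l := by ring
    have hmul1 : (m + 2) * l ≤ (k + 1) * l := Nat.mul_le_mul_right l (by omega)
    have hmul2 : (m + 1) * l ≤ k * l := Nat.mul_le_mul_right l (by omega)
    have hstep : (seq.drop (s + m * l)).take l = (seq.drop (s + m * l + l)).take l := by
      rw [blk_eq_iff seq l (s + m * l) (by omega)]
      intro j hj
      have hidx : m * l + j < pvRun ((pvEqArr seq l).drop s) := by omega
      have ht := pvRun_getD_true _ hidx
      rw [getD_drop] at ht
      have : s + m * l + j = s + (m * l + j) := by ring
      rw [this]; exact ht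
    have hrw : s + (m + 1) * l = s + m * l + l := by omega
    rw [hrw, ← hstep]
    exact hprev

theorem slice_blk (seq : List Int) (a l : Nat) :
    PySem.List.slice seq (some ((a : Nat) : Int)) (some (((a : Nat) : Int) + ((l : Nat) : Int)))
      = (seq.drop a).take l := by
  exact PySem.List.slice_natCast_add seq a l

theorem countA_eq (seq pat : List Int) (l s q : Nat) (hl : 1 ≤ l)
    (hblocks : ∀ i ≤ q, (seq.drop (s + i * l)).take l = pat)
    (hbound : s + (q + 1) * l ≤ seq.length)
    (hfail : seq.length < s + (q + 2) * l ∨ (seq.drop (s + (q + 1) * l)).take l ≠ pat) :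
    ∀ (d : Nat), ∀ (m : Nat) (c : Int) (fuel : Nat), m + d = q + 1 → d < fuel →
      pvCountLoopA seq pat (l : Int) fuel ((s + m * l : Nat) : Int) c = c + d := by
  intro d
  induction d with
  | zero =>
    intro m c fuel hmd hfuel
    obtain ⟨f, rfl⟩ : ∃ f, fuel = f + 1 := ⟨fuel - 1, by omega⟩
    have hm : m = q + 1 := by omega
    subst hm
    have hexp : (q + 2) * l = (q + 1) * l + l := by ring
    rw [pvCountLoopA]
    rcases hfail with hnn | hne
    · rw [if_neg]
      · simp
      · simp only [← Nat.cast_add, Nat.cast_le]; omega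
    · split_ifs with h1 h2
      · exfalso
        rw [show ((s + (q+1)*l : Nat) : Int) + ((l:Nat):Int) = ((s + (q+1)*l : Nat) : Int) + ((l:Nat):Int) from rfl] at h2
        rw [slice_blk] at h2
        exact hne h2
      · simp
      · simp
  | succ d ih =>
    intro m c fuel hmd hfuel
    obtain ⟨f, rfl⟩ : ∃ f, fuel = f + 1 := ⟨fuel - 1, by omega⟩
    have hexp1 : (m + 1) * l = m * l + l := by ring
    have hmul : (m + 1) * l ≤ (q + 1) * l := Nat.mul_le_mul_right l (by omega)
    rw [pvCountLoopA]
    rw [if_pos (by simp only [← Nat.cast_add, Nat.cast_le]; omega)]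
    rw [slice_blk, if_pos (hblocks m (by omega))]
    have hpos : ((s + m * l : Nat) : Int) + ((l : Nat) : Int) = ((s + (m + 1) * l : Nat) : Int) := by
      push_cast; ring
    rw [hpos, ih (m + 1) (c + 1) f (by omega) (by omega)]
    push_cast; ring

theorem zip_map_eq_zipWith (l u : List Int) :
    (l.zip u).map (fun p => p.1 == p.2) = List.zipWith (fun a b => a == b) l u := by
  induction l generalizing u with
  | nil => simp
  | cons a t ih => cases u <;> simp [ih]

theorem entry_iff (seq : List Int) (l s : Nat) (hl : 1 ≤ l) (hs : s + 2 * l ≤ seq.length) :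
    ((seq.drop s).take l = (seq.drop (s + l)).take l)
      ↔ l ≤ pvRun ((pvEqArr seq l).drop s) := by
  rw [blk_eq_iff seq l s hs]
  constructor
  · intro h
    apply pvRun_ge
    intro j hj
    rw [getD_drop]
    exact h j hj
  · intro h j hj
    have := pvRun_getD_true ((pvEqArr seq l).drop s) (by omega : j < pvRun ((pvEqArr seq l).drop s))
    rw [getD_drop] at this
    exact this

theorem perStart (seq : List Int) (L start : Int) (acc : List (List Int × Int × Int))
    (hL : 1 ≤ L) (h0 : 0 ≤ start) (hs : start + 2 * L ≤ (seq.length : Int)) :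
    (if PySem.List.slice seq (some start) (some (start + L)) =
        PySem.List.slice seq (some (start + L)) (some (start + L * 2)) then
       (if 2 ≤ pvCountLoopA seq (PySem.List.slice seq (some start) (some (start + L))) L
              (seq.length + 1) start 0 then
          acc ++ [(PySem.List.slice seq (some start) (some (start + L)),
                   pvCountLoopA seq (PySem.List.slice seq (some start) (some (start + L))) L
                     (seq.length + 1) start 0, start)]
        else acc)
     else acc)
    =
    (if L ≤ PySem.List.pyGetD
             ((((((seq.zip (PySem.List.slice seq (some L) none)).map (fun p => p.1 == p.2)).reverse).foldl
                 (fun r e => r ++ [if e then r.getLastD 0 + 1 else 0]) [0]).reverse)) start 0 then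
       acc ++ [(PySem.List.slice seq (some start) (some (start + L)),
                1 + PySem.Int.floordiv
                      (PySem.List.pyGetD
                        ((((((seq.zip (PySem.List.slice seq (some L) none)).map (fun p => p.1 == p.2)).reverse).foldl
                            (fun r e => r ++ [if e then r.getLastD 0 + 1 else 0]) [0]).reverse)) start 0) L, start)]
     else acc) := by
  obtain ⟨l, rfl⟩ : ∃ l : Nat, L = (l : Int) := ⟨L.toNat, (Int.toNat_of_nonneg (by omega)).symm⟩
  obtain ⟨s, rfl⟩ : ∃ s : Nat, start = (s : Int) := ⟨start.toNat, (Int.toNat_of_nonneg h0).symm⟩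
  have hl : 1 ≤ l := by exact_mod_cast hL
  have hsn : s + 2 * l ≤ seq.length := by exact_mod_cast (by push_cast at hs ⊢; omega : ((s : Int) + (2 * l : Nat) ≤ (seq.length : Int)))
  -- identify B's runs list
  have heq : (seq.zip (PySem.List.slice seq (some (l : Int)) none)).map (fun p => p.1 == p.2)
      = pvEqArr seq l := by
    rw [PySem.List.slice_from_natCast, zip_map_eq_zipWith, pvEqArr]
  have hruns : (((((seq.zip (PySem.List.slice seq (some (l : Int)) none)).map (fun p => p.1 == p.2)).reverse).foldl
      (fun r e => r ++ [if e then r.getLastD 0 + 1 else 0]) [0]).reverse) = pvRunsList (pvEqArr seq l) := by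
    rw [heq, build_eq_runsList, List.reverse_reverse]
  set f := pvRun ((pvEqArr seq l).drop s) with hf
  have hrs : PySem.List.pyGetD (pvRunsList (pvEqArr seq l)) ((s : Nat) : Int) 0 = (f : Int) := by
    rw [PySem.List.pyGetD_natCast, getD_pvRunsList]
  -- identify A's slices
  have hsl1 : ((s : Nat) : Int) + ((l : Nat) : Int) = (((s + l : Nat)) : Int) := by push_cast; ring
  have hsl2 : ((s : Nat) : Int) + ((l : Nat) : Int) * 2 = (((s + l : Nat)) : Int) + ((l : Nat) : Int) := by push_cast; ring
  rw [hruns, hrs]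
  rw [show PySem.List.slice seq (some ((s : Nat) : Int)) (some (((s : Nat) : Int) + ((l : Nat) : Int))) = (seq.drop s).take l from slice_blk seq s l]
  rw [hsl2, hsl1, slice_blk seq (s + l) l]
  -- f bound
  have hfle : f ≤ seq.length - l - s := by
    have := pvRun_le ((pvEqArr seq l).drop s)
    rw [List.length_drop, length_pvEqArr] at this
    omega
  by_cases hcond : l ≤ f
  · set q := f / l with hq
    have hlt : 0 < l := hl
    have hql : q * l ≤ f := Nat.div_mul_le_self f l
    have hfq : f < (q + 1) * l := (Nat.div_lt_iff_lt_mul hlt).1 (by omega)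
    have hkb : s + (q + 1) * l ≤ seq.length := by
      have hexp : (q + 1) * l = q * l + l := by ring
      omega
    have hblocks : ∀ i ≤ q, (seq.drop (s + i * l)).take l = (seq.drop s).take l :=
      chain_fwd seq l s q hkb hql
    have hfail : seq.length < s + (q + 2) * l ∨ (seq.drop (s + (q + 1) * l)).take l ≠ (seq.drop s).take l := by
      by_cases hb : s + (q + 2) * l ≤ seq.length
      · right
        intro hcontra
        have hA : (q + 1) * l = q * l + l := by ring
        have hB : (q + 2) * l = (q + 1) * l + l := by ring
        have hblkq := hblocks q (le_refl q)
        set r := f - q * l with hr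
        have hrl : r < l := by
          have hexp : (q + 1) * l = q * l + l := by ring
          omega
        have hfexp : s + (q + 1) * l + r = s + f + l := by
          have : (q + 1) * l = q * l + l := by ring
          omega
        have hqexp : s + q * l + r = s + f := by omega
        have hfalse : (pvEqArr seq l).getD (s + f) false = false := by
          have := pvRun_getD_self ((pvEqArr seq l).drop s)
          rw [getD_drop] at this
          exact this
        have hsfl : s + f + l < seq.length := by
          have : (q + 2) * l = (q + 1) * l + l := by ring
          omega
        rw [pvEqArr_getD seq l (s + f) hsfl] at hfalse
        simp only [beq_eq_false_iff_ne, ne_eq] at hfalse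
        apply hfalse
        have e1 : ((seq.drop (s + q * l)).take l).getD r 0 = ((seq.drop (s + (q + 1) * l)).take l).getD r 0 := by
          rw [hblkq, hcontra]
        rw [pvBlk_getD seq (s + q * l) l r hrl (by omega),
            pvBlk_getD seq (s + (q + 1) * l) l r hrl (by omega)] at e1
        rw [hqexp] at e1
        rw [hfexp] at e1
        exact e1
      · left; omega
    have hqn : q + 1 < seq.length + 1 := by
      have := Nat.div_le_self f l
      omega
    have hcount : pvCountLoopA seq ((seq.drop s).take l) ((l : Nat) : Int) (seq.length + 1) ((s : Nat) : Int) 0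
        = ((q + 1 : Nat) : Int) := by
      have := countA_eq seq ((seq.drop s).take l) l s q hl hblocks hkb hfail (q + 1) 0 0 (seq.length + 1)
        (by omega) (by omega)
      rw [show s + 0 * l = s by ring] at this
      rw [this]
      push_cast; ring
    have hcentry : (seq.drop s).take l = (seq.drop (s + l)).take l :=
      (entry_iff seq l s hl hsn).2 hcond
    rw [if_pos hcentry, hcount]
    have hq1 : 1 ≤ q := (Nat.one_le_div_iff hlt).2 hcond
    rw [if_pos (by exact_mod_cast hcond : ((l : Nat) : Int) ≤ (f : Int))]
    rw [if_pos (by push_cast; omega : (2 : Int) ≤ ((q + 1 : Nat) : Int))]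
    have hfd : 1 + PySem.Int.floordiv ((f : Nat) : Int) ((l : Nat) : Int) = ((q + 1 : Nat) : Int) := by
      rw [PySem.Int.floordiv_natCast]
      omega
    rw [hfd]
  · have hentry : ¬ ((seq.drop s).take l = (seq.drop (s + l)).take l) := by
      rw [entry_iff seq l s hl hsn]; exact hcond
    rw [if_neg hentry, if_neg (by exact_mod_cast hcond : ¬ ((l : Nat) : Int) ≤ (f : Int))]


theorem pv_witness_ok : Dom_find_repeating_patterns_in_sequence pvWitness_find_repeating_patterns_in_sequence.1 pvWitness_find_repeating_patterns_in_sequence.2.1 pvWitness_find_repeating_patterns_in_sequence.2.2 ∧ Pre_find_repeating_patterns_in_sequence pvWitness_find_repeating_patterns_in_sequence.1 pvWitness_find_repeating_patterns_in_sequence.2.1 pvWitness_find_repeating_patterns_in_sequence.2.2 := by decide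

-- ===== VERDICT (by name: the statement is the Claim_ definition above) =====
theorem find_repeating_patterns_in_sequence_spec : Claim_equal_find_repeating_patterns_in_sequence := by
  intro seq mn mx hdom hpre
  unfold Spec_find_repeating_patterns_in_sequence
  unfold find_repeating_patterns_in_sequence find_repeating_patterns_in_sequence_alt
  rw [PySem.Int.floordiv_eq_ediv_of_pos (by omega : (0:Int) < 2)]
  set n : Int := (seq.length : Int) with hn
  have hn0 : 0 ≤ n := by positivity
  set M : Int := min mx (n / 2) + 1 with hM
  have hMle : M ≤ mx + 1 := by omega
  have hid : ∀ (X : List (List Int × Int × Int)) (L : Int), M ≤ L → L ≤ mx →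
      (PySem.List.pyRange 0 (n - L * 2 + 1) 1).foldl (fun patterns start =>
        let pattern := PySem.List.slice seq (some start) (some (start + L))
        let next_segment := PySem.List.slice seq (some (start + L)) (some (start + L * 2))
        if pattern = next_segment then
          let count := pvCountLoopA seq pattern L (seq.length + 1) start 0
          if 2 ≤ count then patterns ++ [(pattern, count, start)] else patterns
        else patterns) X = X := by
    intro X L hML hLmx
    have hemp : n - L * 2 + 1 ≤ 0 := by omega
    rw [PySem.List.pyRange_one_eq_nil hemp]
    rfl
  rcases (by omega : mn ≤ M ∨ M < mn) with hcase | hcase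
  · rw [PySem.List.pyRange_one_append mn M (mx + 1) hcase hMle, List.foldl_append]
    have htail : ∀ (X : List (List Int × Int × Int)),
        (PySem.List.pyRange M (mx + 1) 1).foldl (fun patterns length =>
          (PySem.List.pyRange 0 (n - length * 2 + 1) 1).foldl (fun patterns start =>
            let pattern := PySem.List.slice seq (some start) (some (start + length))
            let next_segment := PySem.List.slice seq (some (start + length)) (some (start + length * 2))
            if pattern = next_segment then
              let count := pvCountLoopA seq pattern length (seq.length + 1) start 0
              if 2 ≤ count then patterns ++ [(pattern, count, start)] else patterns
            else patterns) patterns) X = X := by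
      intro X
      rw [PySem.List.foldl_congr_mem (g := fun acc _ => acc)]
      · exact List.foldl_fixed _
      · intro acc L hLmem
        have h := (PySem.List.mem_pyRange_one).1 hLmem
        exact hid acc L h.1 (by omega)
    rw [htail]
    apply PySem.List.foldl_congr_mem
    intro acc L hLmem
    have hrange := (PySem.List.mem_pyRange_one).1 hLmem
    have hL : 1 ≤ L := le_trans (hpre (by omega)) hrange.1
    have hbnd : n - L * 2 + 1 = n - 2 * L + 1 := by ring
    simp only [hbnd]
    apply PySem.List.foldl_congr_mem
    intro acc2 start hsmem
    have hsr := (PySem.List.mem_pyRange_one).1 hsmem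
    exact perStart seq L start acc2 hL hsr.1 (by omega)
  · rw [PySem.List.pyRange_one_eq_nil (by omega : M ≤ mn), List.foldl_nil]
    rw [PySem.List.foldl_congr_mem (g := fun acc _ => acc)]
    · exact List.foldl_fixed _
    · intro acc L hLmem
      have h := (PySem.List.mem_pyRange_one).1 hLmem
      exact hid acc L (by omega) (by omega)
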